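-- pv_equiv track=rewrite | github.com/2-07665/ok-wuthering-waves | custom/manage_google_sheet.py | _rows_to_pairs
-- ===== SOURCE A (Python) =====
-- from typing import Iterable, List, Sequence
--
-- def _rows_to_pairs(rows: Iterable[Sequence[str]]) -> list[tuple[str, str]]:
--     pairs: list[tuple[str, str]] = []
--     for row in rows:
--         for idx in range(0, len(row), 2):
--             key = (row[idx] or "").strip()
--             if not key:
--                 continue
--             val = (row[idx + 1] if idx + 1 < len(row) else "").strip()
--             pairs.append((key, val))
--     return pairs
-- ===== SOURCE B (Python) =====
-- def _rows_to_pairs(rows):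
--     pairs = []
--     for row in rows:
--         pending = None  # a stripped key waiting for its value
--         for cell in row:
--             if pending is None:
--                 pending = (cell or "").strip()
--             else:
--                 if pending:
--                     pairs.append((pending, cell.strip()))
--                 pending = None
--         if pending:  # odd-length row: last key takes the empty value
--             pairs.append((pending, ""))
--     return pairs
-- ===== Notes on version B (the rewrite author's own statement) =====
-- stated objective: alternative
-- what changed: Replaces A's stride-2 index loop with row[idx]/row[idx+1] lookups and bounds checks by a state machine: one flat pass over each row's cells that alternates between storing a stripped pending key and emitting (pending, value), flushing a leftover key with an empty value at row end.
import Mathlib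
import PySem

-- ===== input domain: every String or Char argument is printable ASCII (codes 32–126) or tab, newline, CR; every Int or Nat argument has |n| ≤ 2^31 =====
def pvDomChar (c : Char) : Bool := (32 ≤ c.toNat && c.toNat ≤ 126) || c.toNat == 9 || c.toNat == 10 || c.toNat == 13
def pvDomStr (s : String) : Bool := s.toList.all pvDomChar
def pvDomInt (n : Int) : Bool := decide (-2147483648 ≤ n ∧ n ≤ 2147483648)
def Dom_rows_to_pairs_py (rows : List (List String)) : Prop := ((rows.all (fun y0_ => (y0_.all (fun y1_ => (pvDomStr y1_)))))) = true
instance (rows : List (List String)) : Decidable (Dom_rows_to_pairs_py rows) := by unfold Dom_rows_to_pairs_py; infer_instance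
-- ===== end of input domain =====

-- B replaces A's stride-2 index loop (row[idx], row[idx+1] with a bounds check) by a state machine:
-- one flat pass over each row's cells alternating a pending stripped key with emitting the pair,
-- flushing a leftover key with "" at row end (objective: alternative; same cost).

-- ===== PORT A =====
-- body of A's inner loop: key = (row[idx] or "").strip(); if not key: continue; val = (row[idx+1] if idx+1 < len(row) else "").strip()
def bodyA (row : List String) (pairs : List (String × String)) (idx : Int) : List (String × String) :=
  let s := PySem.List.pyGetD row idx ""
  let key := PySem.Str.strip (if s == "" then "" else s)
  if key == "" then pairs
  else
    let val := PySem.Str.strip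
      (if idx + 1 < (row.length : Int) then PySem.List.pyGetD row (idx + 1) "" else "")
    pairs ++ [(key, val)]

def rows_to_pairs_py (rows : List (List String)) : List (String × String) :=
  rows.foldl (fun pairs row =>
    (PySem.List.pyRange 0 (row.length : Int) 2).foldl (bodyA row) pairs) []

-- ===== PORT B =====
-- B's inner-loop body: pending is None → store (cell or "").strip(); otherwise emit (pending, cell.strip()) if pending non-empty
def stepB (st : List (String × String) × Option String) (cell : String) :
    List (String × String) × Option String :=
  match st.2 with
  | none => (st.1, some (PySem.Str.strip (if cell == "" then "" else cell)))
  | some p => ((if p == "" then st.1 else st.1 ++ [(p, PySem.Str.strip cell)]), none)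

-- B's per-row pass plus the end-of-row flush of a leftover pending key
def rowB (pairs : List (String × String)) (row : List String) : List (String × String) :=
  let st := row.foldl stepB (pairs, none)
  match st.2 with
  | some p => if p == "" then st.1 else st.1 ++ [(p, "")]
  | none => st.1

def rows_to_pairs_py_alt (rows : List (List String)) : List (String × String) :=
  rows.foldl rowB []

-- ===== PRECONDITION & SPEC =====
def Spec_rows_to_pairs_py (rows : List (List String)) (out : List (String × String)) : Prop := out = rows_to_pairs_py_alt rows
instance (rows : List (List String)) (out : List (String × String)) : Decidable (Spec_rows_to_pairs_py rows out) := by unfold Spec_rows_to_pairs_py; infer_instance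

-- ===== CLAIM (what is proved, stated in full; the proofs are below) =====
def Claim_equal_rows_to_pairs_py : Prop := ∀ (rows : List (List String)), Dom_rows_to_pairs_py rows → Spec_rows_to_pairs_py rows (rows_to_pairs_py rows)

-- ===== LEMMAS AND PROOFS =====

-- the per-row contribution both inner loops produce
def rowPairs : List String → List (String × String)
  | [] => []
  | [k] =>
      let key := PySem.Str.strip k
      if key == "" then [] else [(key, "")]
  | k :: v :: rest =>
      (let key := PySem.Str.strip k
       if key == "" then [] else [(key, PySem.Str.strip v)]) ++ rowPairs rest

theorem if_eq_empty_id (s : String) : (if s == "" then "" else s) = s := by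
  split <;> simp_all

theorem strip_empty : PySem.Str.strip "" = "" := by decide

theorem pyRange_two_nil (a b : Int) (h : b ≤ a) : PySem.List.pyRange a b 2 = [] := by
  rw [PySem.List.pyRange_of_pos a b (by norm_num)]
  rw [if_neg (by omega)]
  simp

theorem pyRange_two_cons (a b : Int) (h : a < b) :
    PySem.List.pyRange a b 2 = a :: PySem.List.pyRange (a + 2) b 2 := by
  rw [PySem.List.pyRange_of_pos a b (by norm_num),
      PySem.List.pyRange_of_pos (a + 2) b (by norm_num)]
  rw [if_pos h]
  by_cases h2 : a + 2 < b
  · rw [if_pos h2]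
    have hcount : ((b - a + 2 - 1) / 2).toNat = ((b - (a + 2) + 2 - 1) / 2).toNat + 1 := by
      omega
    rw [hcount, List.range_succ_eq_map]
    simp only [List.map_cons, List.map_map]
    congr 1
    · push_cast; ring
    · apply List.map_congr_left
      intro k _
      simp only [Function.comp_apply]
      push_cast; ring
  · rw [if_neg h2]
    have hcount : ((b - a + 2 - 1) / 2).toNat = 1 := by omega
    rw [hcount]
    simp

theorem A_inner (row : List String) :
    ∀ (k j : Nat) (acc : List (String × String)), row.length - j ≤ k →
    (PySem.List.pyRange (j : Int) (row.length : Int) 2).foldl (bodyA row) acc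
      = acc ++ rowPairs (row.drop j) := by
  intro k
  induction k with
  | zero =>
      intro j acc h
      have hj : row.length ≤ j := by omega
      rw [pyRange_two_nil _ _ (by exact_mod_cast hj),
          List.drop_eq_nil_of_le hj]
      simp [rowPairs]
  | succ k ih =>
      intro j acc h
      by_cases hj : row.length ≤ j
      · rw [pyRange_two_nil _ _ (by exact_mod_cast hj),
            List.drop_eq_nil_of_le hj]
        simp [rowPairs]
      · have hj : j < row.length := by omega
        rw [pyRange_two_cons _ _ (by exact_mod_cast hj)]
        have hcast : ((j : Int) + 2) = ((j + 2 : Nat) : Int) := by push_cast; ring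
        rw [List.foldl_cons, hcast, ih (j + 2) _ (by omega)]
        have hdropj : row.drop j = row[j] :: row.drop (j + 1) :=
          List.drop_eq_getElem_cons hj
        have hget : PySem.List.pyGetD row (j : Int) "" = row[j] := by
          rw [PySem.List.pyGetD_natCast, List.getD_eq_getElem row "" hj]
        by_cases hj1 : j + 1 < row.length
        · have hdropj1 : row.drop (j + 1) = row[j + 1] :: row.drop (j + 2) :=
            List.drop_eq_getElem_cons hj1
          have hget1 : PySem.List.pyGetD row ((j : Int) + 1) "" = row[j + 1] := by
            have : ((j : Int) + 1) = ((j + 1 : Nat) : Int) := by push_cast; ring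
            rw [this, PySem.List.pyGetD_natCast, List.getD_eq_getElem row "" hj1]
          rw [hdropj, hdropj1]
          show _ = acc ++ rowPairs (row[j] :: row[j + 1] :: row.drop (j + 2))
          rw [rowPairs]
          simp only [bodyA]
          rw [if_eq_empty_id, hget, if_pos (show ((j : Int) + 1 < (row.length : Int)) by exact_mod_cast hj1), hget1]
          split <;> simp
        · have hj1' : row.length = j + 1 := by omega
          have hdropj1 : row.drop (j + 1) = [] := List.drop_eq_nil_of_le (by omega)
          rw [hdropj, hdropj1]
          show _ = acc ++ rowPairs [row[j]]
          rw [rowPairs]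
          simp only [bodyA]
          rw [if_eq_empty_id, hget,
            if_neg (show ¬ ((j : Int) + 1 < (row.length : Int)) by exact_mod_cast (by omega : ¬ (j + 1 < row.length))),
            strip_empty, List.drop_eq_nil_of_le (show row.length ≤ j + 2 by omega)]
          split <;> simp [rowPairs]

-- induction scheme consuming the row two cells at a time (proof helper only)
def twoStep : List String → Unit
  | [] => ()
  | [_] => ()
  | _ :: _ :: rest => twoStep rest

theorem B_inner : ∀ (row : List String) (acc : List (String × String)),
    rowB acc row = acc ++ rowPairs row := by
  intro row
  induction row using twoStep.induct with
  | case1 => intro acc; simp [rowB, rowPairs]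
  | case2 k =>
      intro acc
      simp only [rowB, rowPairs, List.foldl, stepB]
      rw [if_eq_empty_id]
      split <;> simp_all
  | case3 k v rest ih =>
      intro acc
      have : rowB acc (k :: v :: rest)
          = rowB (if PySem.Str.strip k == "" then acc
                  else acc ++ [(PySem.Str.strip k, PySem.Str.strip v)]) rest := by
        simp only [rowB, List.foldl, stepB, if_eq_empty_id]
      rw [this, ih, rowPairs]
      split <;> simp_all

theorem ports_eq (rows : List (List String)) :
    rows_to_pairs_py rows = rows_to_pairs_py_alt rows := by
  unfold rows_to_pairs_py rows_to_pairs_py_alt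
  induction rows using List.reverseRecOn with
  | nil => rfl
  | append_singleton rs r ih =>
      rw [List.foldl_append, List.foldl_append, ih]
      simp only [List.foldl]
      rw [B_inner]
      have h0 : (0 : Int) = ((0 : Nat) : Int) := by norm_num
      rw [h0, A_inner r (r.length) 0 _ (by omega)]
      simp

-- ===== VERDICT (by name: the statement is the Claim_ definition above) =====
theorem rows_to_pairs_py_spec : Claim_equal_rows_to_pairs_py := by
  intro rows _
  exact ports_eq rows
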